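-- pv_equiv track=rewrite | github.com/muratgu/aoc2024 | day14.py | calc_risk
-- ===== SOURCE A (Python) =====
-- def calc_risk(robots, width, height):
--     w, h = (width // 2, height // 2)
--     dw, dh = (width % 2, height % 2)
--     quads = [ ( 0   , 0    ), ( w+dw, 0    ),
--               ( 0   , h+dh ), ( w+dw, h+dh ) ]
--     risk = 1
--     for q in quads:
--         qx, qy = q
--         n = 0
--         for r in robots:
--             px, py = r[0]
--             if qx <= px < qx+w \
--            and qy <= py < qy+h:
--                 n += 1
--         risk *= 1 if n == 0 else n
--     return risk
-- ===== SOURCE B (Python) =====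
-- def calc_risk(robots, width, height):
--     w, h = width // 2, height // 2
--     dw, dh = width % 2, height % 2
--     c00 = c10 = c01 = c11 = 0
--     for (px, py), _ in robots:
--         if 0 <= px < w:
--             xs = 0
--         elif w + dw <= px < w + dw + w:
--             xs = 1
--         else:
--             continue
--         if 0 <= py < h:
--             ys = 0
--         elif h + dh <= py < h + dh + h:
--             ys = 1
--         else:
--             continue
--         if xs == 0:
--             if ys == 0: c00 += 1
--             else: c01 += 1
--         else:
--             if ys == 0: c10 += 1
--             else: c11 += 1
--     risk = 1
--     for c in (c00, c10, c01, c11):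
--         risk *= c if c > 0 else 1
--     return risk
-- ===== Notes on version B (the rewrite author's own statement) =====
-- stated objective: alternative
-- what changed: Replaces A's four full rescans of the robot list (one per quadrant) by a single classifying pass that buckets each robot into one of four counters, then multiplies the counters.
import Mathlib
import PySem

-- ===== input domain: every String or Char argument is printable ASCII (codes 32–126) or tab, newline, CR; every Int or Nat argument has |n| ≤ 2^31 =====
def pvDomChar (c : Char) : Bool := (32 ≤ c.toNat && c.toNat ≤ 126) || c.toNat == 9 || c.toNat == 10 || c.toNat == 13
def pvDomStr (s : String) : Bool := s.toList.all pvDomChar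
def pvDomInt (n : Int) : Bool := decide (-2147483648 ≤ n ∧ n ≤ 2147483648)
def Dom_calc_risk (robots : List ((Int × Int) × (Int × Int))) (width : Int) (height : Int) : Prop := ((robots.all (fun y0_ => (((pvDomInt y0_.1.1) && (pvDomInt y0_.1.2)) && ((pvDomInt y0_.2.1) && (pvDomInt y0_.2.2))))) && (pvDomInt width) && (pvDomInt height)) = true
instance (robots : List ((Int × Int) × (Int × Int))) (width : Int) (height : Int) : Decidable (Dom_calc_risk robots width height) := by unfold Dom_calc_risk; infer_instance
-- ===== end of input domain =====

-- B replaces A's four full rescans of the robot list (one per quadrant) by one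
-- classifying pass that buckets each robot into one of four counters (objective: alternative).

-- ===== PORT A =====
def calc_risk (robots : List ((Int × Int) × (Int × Int))) (width : Int) (height : Int) : Int :=
  let w := PySem.Int.floordiv width 2
  let h := PySem.Int.floordiv height 2
  let dw := PySem.Int.mod width 2
  let dh := PySem.Int.mod height 2
  let quads : List (Int × Int) := [(0, 0), (w + dw, 0), (0, h + dh), (w + dw, h + dh)]
  quads.foldl (fun (risk : Int) q =>
    let qx := q.1
    let qy := q.2
    let n := robots.foldl (fun (n : Int) r =>
      let px := r.1.1
      let py := r.1.2
      if qx ≤ px ∧ px < qx + w ∧ qy ≤ py ∧ py < qy + h then n + 1 else n) 0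
    risk * (if n = 0 then 1 else n)) 1

-- ===== PORT B =====
-- one step of B's classifying loop (the 'continue's become Option matches)
def pvStep (w dw h dh : Int) (st : Int × Int × Int × Int) (r : (Int × Int) × (Int × Int)) :
    Int × Int × Int × Int :=
  let px := r.1.1
  let py := r.1.2
  match (if 0 ≤ px ∧ px < w then some (0 : Int)
         else if w + dw ≤ px ∧ px < w + dw + w then some 1 else none) with
  | none => st
  | some xs =>
    match (if 0 ≤ py ∧ py < h then some (0 : Int)
           else if h + dh ≤ py ∧ py < h + dh + h then some 1 else none) with
    | none => st
    | some ys =>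
      if xs = 0 then
        if ys = 0 then (st.1 + 1, st.2.1, st.2.2.1, st.2.2.2)
        else (st.1, st.2.1, st.2.2.1 + 1, st.2.2.2)
      else
        if ys = 0 then (st.1, st.2.1 + 1, st.2.2.1, st.2.2.2)
        else (st.1, st.2.1, st.2.2.1, st.2.2.2 + 1)

def calc_risk_alt (robots : List ((Int × Int) × (Int × Int))) (width : Int) (height : Int) : Int :=
  let w := PySem.Int.floordiv width 2
  let h := PySem.Int.floordiv height 2
  let dw := PySem.Int.mod width 2
  let dh := PySem.Int.mod height 2
  let st := robots.foldl (pvStep w dw h dh) (0, 0, 0, 0)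
  [st.1, st.2.1, st.2.2.1, st.2.2.2].foldl (fun (risk : Int) c => risk * (if c > 0 then c else 1)) 1

-- ===== PRECONDITION & SPEC =====
def Spec_calc_risk (robots : List ((Int × Int) × (Int × Int))) (width : Int) (height : Int) (out : Int) : Prop := out = calc_risk_alt robots width height
instance (robots : List ((Int × Int) × (Int × Int))) (width : Int) (height : Int) (out : Int) : Decidable (Spec_calc_risk robots width height out) := by unfold Spec_calc_risk; infer_instance

-- ===== CLAIM (what is proved, stated in full; the proofs are below) =====
def Claim_equal_calc_risk : Prop := ∀ (robots : List ((Int × Int) × (Int × Int))) (width : Int) (height : Int), Dom_calc_risk robots width height → Spec_calc_risk robots width height (calc_risk robots width height)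

-- ===== LEMMAS AND PROOFS =====

-- A's inner counting loop, abstracted over the quadrant corner
def pvCnt (qx qy w h : Int) (robots : List ((Int × Int) × (Int × Int))) (n : Int) : Int :=
  robots.foldl (fun (n : Int) r =>
    if qx ≤ r.1.1 ∧ r.1.1 < qx + w ∧ qy ≤ r.1.2 ∧ r.1.2 < qy + h then n + 1 else n) n

theorem pvCnt_shift (qx qy w h : Int) (robots : List ((Int × Int) × (Int × Int))) (n : Int) :
    pvCnt qx qy w h robots n = n + pvCnt qx qy w h robots 0 := by
  induction robots generalizing n with
  | nil => simp [pvCnt]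
  | cons r rs ih =>
    show pvCnt qx qy w h rs _ = n + pvCnt qx qy w h rs _
    beta_reduce
    split_ifs
    · rw [ih (n + 1), ih (0 + 1)]; ring
    · exact ih n

theorem pvCnt_cons0 (qx qy w h : Int) (r : (Int × Int) × (Int × Int))
    (rs : List ((Int × Int) × (Int × Int))) :
    pvCnt qx qy w h (r :: rs) 0 =
      (if qx ≤ r.1.1 ∧ r.1.1 < qx + w ∧ qy ≤ r.1.2 ∧ r.1.2 < qy + h then (1:Int) else 0) +
        pvCnt qx qy w h rs 0 := by
  show pvCnt qx qy w h rs _ = _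
  beta_reduce
  rw [pvCnt_shift]
  split_ifs <;> ring

theorem pvCnt_nonneg (qx qy w h : Int) (robots : List ((Int × Int) × (Int × Int))) :
    0 ≤ pvCnt qx qy w h robots 0 := by
  induction robots with
  | nil => simp [pvCnt]
  | cons r rs ih =>
    rw [pvCnt_cons0]
    split_ifs <;> omega

theorem pvStep_eq (w dw h dh : Int) (hdw : 0 ≤ dw) (hdh : 0 ≤ dh)
    (st : Int × Int × Int × Int) (r : (Int × Int) × (Int × Int)) :
    pvStep w dw h dh st r =
      (st.1 + (if 0 ≤ r.1.1 ∧ r.1.1 < 0 + w ∧ 0 ≤ r.1.2 ∧ r.1.2 < 0 + h then 1 else 0),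
       st.2.1 + (if w + dw ≤ r.1.1 ∧ r.1.1 < w + dw + w ∧ 0 ≤ r.1.2 ∧ r.1.2 < 0 + h then 1 else 0),
       st.2.2.1 + (if 0 ≤ r.1.1 ∧ r.1.1 < 0 + w ∧ h + dh ≤ r.1.2 ∧ r.1.2 < h + dh + h then 1 else 0),
       st.2.2.2 + (if w + dw ≤ r.1.1 ∧ r.1.1 < w + dw + w ∧ h + dh ≤ r.1.2 ∧ r.1.2 < h + dh + h then 1 else 0)) := by
  unfold pvStep
  by_cases hx0 : 0 ≤ r.1.1 ∧ r.1.1 < w <;>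
    by_cases hx1 : w + dw ≤ r.1.1 ∧ r.1.1 < w + dw + w <;>
      by_cases hy0 : 0 ≤ r.1.2 ∧ r.1.2 < h <;>
        by_cases hy1 : h + dh ≤ r.1.2 ∧ r.1.2 < h + dh + h <;>
          first
          | (exfalso; omega)
          | simp [hx0, hx1, hy0, hy1]

theorem pvFold_eq (w dw h dh : Int) (hdw : 0 ≤ dw) (hdh : 0 ≤ dh)
    (robots : List ((Int × Int) × (Int × Int))) (st : Int × Int × Int × Int) :
    robots.foldl (pvStep w dw h dh) st =
      (st.1 + pvCnt 0 0 w h robots 0,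
       st.2.1 + pvCnt (w + dw) 0 w h robots 0,
       st.2.2.1 + pvCnt 0 (h + dh) w h robots 0,
       st.2.2.2 + pvCnt (w + dw) (h + dh) w h robots 0) := by
  induction robots generalizing st with
  | nil => simp [pvCnt]
  | cons r rs ih =>
    simp only [List.foldl_cons]
    rw [ih, pvStep_eq w dw h dh hdw hdh]
    simp only [Prod.ext_iff]
    refine ⟨?_, ?_, ?_, ?_⟩ <;> · rw [pvCnt_cons0]; ring

theorem pvCnt_def (qx qy w h : Int) (robots : List ((Int × Int) × (Int × Int))) :
    (List.foldl (fun (n : Int) r =>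
      if qx ≤ r.1.1 ∧ r.1.1 < qx + w ∧ qy ≤ r.1.2 ∧ r.1.2 < qy + h then n + 1 else n) 0 robots)
      = pvCnt qx qy w h robots 0 := rfl

theorem pvFac (a : Int) (ha : 0 ≤ a) :
    (if a = 0 then (1:Int) else a) = (if 0 + a > 0 then 0 + a else 1) := by
  split_ifs <;> omega

-- ===== VERDICT (by name: the statement is the Claim_ definition above) =====
theorem calc_risk_spec : Claim_equal_calc_risk := by
  intro robots width height _
  have hdw : 0 ≤ PySem.Int.mod width 2 := PySem.Int.mod_nonneg _ (by norm_num)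
  have hdh : 0 ≤ PySem.Int.mod height 2 := PySem.Int.mod_nonneg _ (by norm_num)
  simp only [Spec_calc_risk, calc_risk, calc_risk_alt, List.foldl_cons, List.foldl_nil]
  rw [pvFold_eq _ _ _ _ hdw hdh]
  simp only [pvCnt_def]
  rw [pvFac _ (pvCnt_nonneg _ _ _ _ _), pvFac _ (pvCnt_nonneg _ _ _ _ _),
      pvFac _ (pvCnt_nonneg _ _ _ _ _), pvFac _ (pvCnt_nonneg _ _ _ _ _)]
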